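-- pv_equiv track=rewrite | github.com/thomaskim09/NodeFlow | ui/dashboard/dashboard_view.py | _calculate_direct_stats
-- ===== SOURCE A (Python) =====
-- def _calculate_direct_stats(segments):
--     node_stats, total_coded_words = {}, 0
--     for seg in segments:
--         node_stats.setdefault(seg["node_id"], {"word_count": 0, "segment_count": 0})
--         word_count = len(seg["content_preview"].split())
--         node_stats[seg["node_id"]]["segment_count"] += 1
--         node_stats[seg["node_id"]]["word_count"] += word_count
--         total_coded_words += word_count
--     return node_stats, total_coded_words
-- ===== SOURCE B (Python) =====
-- def _calculate_direct_stats(segments):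
--     # Phase 1: group per-segment word counts by node_id (first-appearance order).
--     grouped = {}
--     for seg in segments:
--         grouped.setdefault(seg["node_id"], []).append(len(seg["content_preview"].split()))
--     # Phase 2: fold each group into its stats dict.
--     node_stats = {nid: {"word_count": sum(counts), "segment_count": len(counts)}
--                   for nid, counts in grouped.items()}
--     total_coded_words = sum(len(seg["content_preview"].split()) for seg in segments)
--     return node_stats, total_coded_words
-- ===== Notes on version B (the rewrite author's own statement) =====
-- stated objective: alternative
-- what changed: B splits A's single loop of in-place per-segment counter updates into two phases: it first groups the per-segment word counts into lists keyed by node_id, then derives each node's stats dict from its list (sum/len) and the grand total from a separate sum over segments.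
import Mathlib
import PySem

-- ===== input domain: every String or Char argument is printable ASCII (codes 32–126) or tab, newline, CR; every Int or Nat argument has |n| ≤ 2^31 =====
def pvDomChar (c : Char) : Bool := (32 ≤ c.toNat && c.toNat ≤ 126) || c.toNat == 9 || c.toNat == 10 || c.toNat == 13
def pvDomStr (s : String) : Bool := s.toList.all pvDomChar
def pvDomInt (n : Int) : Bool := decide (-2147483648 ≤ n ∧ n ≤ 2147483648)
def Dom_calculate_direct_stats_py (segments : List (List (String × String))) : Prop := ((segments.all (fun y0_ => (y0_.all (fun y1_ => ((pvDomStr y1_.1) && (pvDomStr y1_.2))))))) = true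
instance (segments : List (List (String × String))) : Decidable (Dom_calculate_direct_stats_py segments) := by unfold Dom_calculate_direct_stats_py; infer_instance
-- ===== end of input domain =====

-- B regroups: phase 1 collects per-segment word counts per node_id, phase 2 derives each stats dict
-- by sum/len and the total by a separate sum over segments (alternative decomposition, same cost).


-- ===== PORT A =====
def calculate_direct_stats_py (segments : List (List (String × String))) : (List (String × List (String × Int))) × Int :=
  let res := segments.foldl
    (fun (st : PySem.Dict String (PySem.Dict String Int) × Int) seg =>
      let nid := ((PySem.Dict.mk seg).get? "node_id").getD ""
      let ns1 := st.1.setdefault nid (PySem.Dict.mk [("word_count", (0 : Int)), ("segment_count", (0 : Int))])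
      let wc : Int := ((PySem.Str.split₀ (((PySem.Dict.mk seg).get? "content_preview").getD "")).length : Int)
      let ns2 := ns1.modify nid (PySem.Dict.mk []) (fun inner => inner.modify "segment_count" 0 (· + 1))
      let ns3 := ns2.modify nid (PySem.Dict.mk []) (fun inner => inner.modify "word_count" 0 (· + wc))
      (ns3, st.2 + wc))
    (PySem.Dict.empty, 0)
  (res.1.items.map (fun p => (p.1, p.2.items)), res.2)

-- ===== PORT B =====
def calculate_direct_stats_py_alt (segments : List (List (String × String))) : (List (String × List (String × Int))) × Int :=
  let grouped := segments.foldl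
    (fun (g : PySem.Dict String (List Int)) seg =>
      g.modify (((PySem.Dict.mk seg).get? "node_id").getD "") []
        (fun counts => counts ++ [((PySem.Str.split₀ (((PySem.Dict.mk seg).get? "content_preview").getD "")).length : Int)]))
    PySem.Dict.empty
  (grouped.items.map (fun p => (p.1, [("word_count", p.2.sum), ("segment_count", (p.2.length : Int))])),
   (segments.map (fun seg => ((PySem.Str.split₀ (((PySem.Dict.mk seg).get? "content_preview").getD "")).length : Int))).sum)

-- ===== PRECONDITION & SPEC =====
-- Pre_ excludes exactly the segments missing a "node_id" or "content_preview" key, on which Python's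
-- seg["node_id"] / seg["content_preview"] raises KeyError (in A and B alike).
def Pre_calculate_direct_stats_py (segments : List (List (String × String))) : Prop :=
  ∀ seg ∈ segments, "node_id" ∈ seg.map Prod.fst ∧ "content_preview" ∈ seg.map Prod.fst
instance (segments : List (List (String × String))) : Decidable (Pre_calculate_direct_stats_py segments) := by
  unfold Pre_calculate_direct_stats_py; infer_instance
def pvWitness_calculate_direct_stats_py : (List (List (String × String))) :=
  [[("node_id", "n1"), ("content_preview", "hello world")], [("node_id", "n2"), ("content_preview", "")]]

def Spec_calculate_direct_stats_py (segments : List (List (String × String))) (out : (List (String × List (String × Int))) × Int) : Prop := out = calculate_direct_stats_py_alt segments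
instance (segments : List (List (String × String))) (out : (List (String × List (String × Int))) × Int) : Decidable (Spec_calculate_direct_stats_py segments out) := by unfold Spec_calculate_direct_stats_py; infer_instance

-- ===== CLAIM (what is proved, stated in full; the proofs are below) =====
def Claim_equal_calculate_direct_stats_py : Prop := ∀ (segments : List (List (String × String))), Dom_calculate_direct_stats_py segments → Pre_calculate_direct_stats_py segments → Spec_calculate_direct_stats_py segments (calculate_direct_stats_py segments)

-- ===== LEMMAS AND PROOFS =====

-- helper: B's grouped dict rendered as A's dict-of-stats-dicts state
def pvNid (seg : List (String × String)) : String := ((PySem.Dict.mk seg).get? "node_id").getD ""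
def pvWC (seg : List (String × String)) : Int :=
  ((PySem.Str.split₀ (((PySem.Dict.mk seg).get? "content_preview").getD "")).length : Int)
def pvMapG (g : PySem.Dict String (List Int)) : PySem.Dict String (PySem.Dict String Int) :=
  PySem.Dict.mk (g.items.map (fun p =>
    (p.1, PySem.Dict.mk [("word_count", p.2.sum), ("segment_count", (p.2.length : Int))])))

lemma pvMapG_contains (g : PySem.Dict String (List Int)) (k : String) :
    (pvMapG g).contains k = g.contains k := by
  simp [pvMapG, PySem.Dict.contains, List.any_map, Function.comp_def]
lemma pvMapG_get? (g : PySem.Dict String (List Int)) (k : String) :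
    (pvMapG g).get? k = (g.get? k).map (fun cs =>
      PySem.Dict.mk [("word_count", cs.sum), ("segment_count", (cs.length : Int))]) := by
  simp [pvMapG, PySem.Dict.get?, List.find?_map, Function.comp_def, Option.map_map]

lemma pvMapG_insert (g : PySem.Dict String (List Int)) (k : String) (l : List Int) :
    pvMapG (g.insert k l)
      = (pvMapG g).insert k (PySem.Dict.mk [("word_count", l.sum), ("segment_count", (l.length : Int))]) := by
  apply PySem.Dict.ext
  by_cases hc : g.contains k = true
  · rw [show (pvMapG (g.insert k l)).items = (g.insert k l).items.map (fun p =>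
        (p.1, PySem.Dict.mk [("word_count", p.2.sum), ("segment_count", (p.2.length : Int))])) from rfl]
    rw [PySem.Dict.items_insert_of_contains _ _ hc,
        PySem.Dict.items_insert_of_contains _ _ (by rw [pvMapG_contains]; exact hc)]
    rw [show (pvMapG g).items = g.items.map (fun p =>
        (p.1, PySem.Dict.mk [("word_count", p.2.sum), ("segment_count", (p.2.length : Int))])) from rfl]
    rw [List.map_map, List.map_map]
    apply List.map_congr_left
    intro p _
    by_cases h : p.1 = k <;> simp [h]
  · rw [show (pvMapG (g.insert k l)).items = (g.insert k l).items.map (fun p =>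
        (p.1, PySem.Dict.mk [("word_count", p.2.sum), ("segment_count", (p.2.length : Int))])) from rfl]
    rw [PySem.Dict.items_insert_of_not_contains _ _ (by simpa using hc),
        PySem.Dict.items_insert_of_not_contains _ _ (by rw [pvMapG_contains]; simpa using hc)]
    simp [pvMapG]

lemma pv_dict_step (g : PySem.Dict String (List Int)) (nid : String) (wc : Int) :
    ((((pvMapG g).setdefault nid (PySem.Dict.mk [("word_count", (0 : Int)), ("segment_count", (0 : Int))])).modify
        nid (PySem.Dict.mk []) (fun inner => inner.modify "segment_count" 0 (· + 1))).modify
        nid (PySem.Dict.mk []) (fun inner => inner.modify "word_count" 0 (· + wc)))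
      = pvMapG (g.modify nid [] (fun counts => counts ++ [wc])) := by
  by_cases hc : g.contains nid = true
  · -- key already present: setdefault is a no-op; all ops map over items
    obtain ⟨cs, hcs⟩ : ∃ cs, g.get? nid = some cs := by
      have := PySem.Dict.contains_eq_isSome_get? (d := g) (k := nid)
      rw [hc] at this; exact Option.isSome_iff_exists.mp this.symm
    rw [PySem.Dict.setdefault_of_contains _ _ (by rw [pvMapG_contains]; exact hc)]
    have e1 : (pvMapG g).modify nid (PySem.Dict.mk []) (fun inner => inner.modify "segment_count" 0 (· + 1))
        = (pvMapG g).insert nid (PySem.Dict.mk [("word_count", cs.sum), ("segment_count", (cs.length : Int) + 1)]) := by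
      rw [PySem.Dict.modify, PySem.Dict.getD_eq_get?_getD, pvMapG_get?, hcs]
      exact congrArg _ (by simp [PySem.Dict.modify, PySem.Dict.insert, PySem.Dict.contains,
        PySem.Dict.getD, PySem.Dict.get?])
    rw [e1]
    have e2 : ((pvMapG g).insert nid (PySem.Dict.mk [("word_count", cs.sum), ("segment_count", (cs.length : Int) + 1)])).modify
          nid (PySem.Dict.mk []) (fun inner => inner.modify "word_count" 0 (· + wc))
        = (pvMapG g).insert nid (PySem.Dict.mk [("word_count", cs.sum + wc), ("segment_count", (cs.length : Int) + 1)]) := by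
      rw [PySem.Dict.modify, PySem.Dict.getD_eq_get?_getD, PySem.Dict.get?_insert_self,
          PySem.Dict.insert_insert_self]
      exact congrArg _ (by simp [PySem.Dict.modify, PySem.Dict.insert, PySem.Dict.contains,
        PySem.Dict.getD, PySem.Dict.get?])
    rw [e2]
    rw [PySem.Dict.modify, PySem.Dict.getD_eq_get?_getD, hcs, pvMapG_insert]
    simp
  · have hc' : g.contains nid = false := by simpa using hc
    rw [PySem.Dict.setdefault_of_not_contains _ _ (by rw [pvMapG_contains]; exact hc')]
    have hg : g.get? nid = none := by
      have := PySem.Dict.contains_eq_isSome_get? (d := g) (k := nid)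
      rw [hc'] at this
      exact Option.not_isSome_iff_eq_none.mp (by rw [← this]; simp)
    have e1 : ((pvMapG g).insert nid (PySem.Dict.mk [("word_count", (0 : Int)), ("segment_count", (0 : Int))])).modify
          nid (PySem.Dict.mk []) (fun inner => inner.modify "segment_count" 0 (· + 1))
        = (pvMapG g).insert nid (PySem.Dict.mk [("word_count", (0 : Int)), ("segment_count", (1 : Int))]) := by
      rw [PySem.Dict.modify, PySem.Dict.getD_eq_get?_getD, PySem.Dict.get?_insert_self,
          PySem.Dict.insert_insert_self]
      exact congrArg _ (by simp [PySem.Dict.modify, PySem.Dict.insert, PySem.Dict.contains,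
        PySem.Dict.getD, PySem.Dict.get?])
    rw [e1]
    have e2 : ((pvMapG g).insert nid (PySem.Dict.mk [("word_count", (0 : Int)), ("segment_count", (1 : Int))])).modify
          nid (PySem.Dict.mk []) (fun inner => inner.modify "word_count" 0 (· + wc))
        = (pvMapG g).insert nid (PySem.Dict.mk [("word_count", wc), ("segment_count", (1 : Int))]) := by
      rw [PySem.Dict.modify, PySem.Dict.getD_eq_get?_getD, PySem.Dict.get?_insert_self,
          PySem.Dict.insert_insert_self]
      exact congrArg _ (by simp [PySem.Dict.modify, PySem.Dict.insert, PySem.Dict.contains,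
        PySem.Dict.getD, PySem.Dict.get?])
    rw [e2]
    rw [PySem.Dict.modify, PySem.Dict.getD_eq_get?_getD, hg, pvMapG_insert]
    simp

lemma pv_main (segs : List (List (String × String))) : ∀ (g : PySem.Dict String (List Int)) (t : Int),
    segs.foldl
      (fun (st : PySem.Dict String (PySem.Dict String Int) × Int) seg =>
        let nid := ((PySem.Dict.mk seg).get? "node_id").getD ""
        let ns1 := st.1.setdefault nid (PySem.Dict.mk [("word_count", (0 : Int)), ("segment_count", (0 : Int))])
        let wc : Int := ((PySem.Str.split₀ (((PySem.Dict.mk seg).get? "content_preview").getD "")).length : Int)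
        let ns2 := ns1.modify nid (PySem.Dict.mk []) (fun inner => inner.modify "segment_count" 0 (· + 1))
        let ns3 := ns2.modify nid (PySem.Dict.mk []) (fun inner => inner.modify "word_count" 0 (· + wc))
        (ns3, st.2 + wc))
      (pvMapG g, t)
    = (pvMapG (segs.foldl
        (fun (g : PySem.Dict String (List Int)) seg =>
          g.modify (((PySem.Dict.mk seg).get? "node_id").getD "") []
            (fun counts => counts ++ [((PySem.Str.split₀ (((PySem.Dict.mk seg).get? "content_preview").getD "")).length : Int)]))
        g),
       t + (segs.map pvWC).sum) := by
  induction segs with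
  | nil => intro g t; simp
  | cons s rest ih =>
    intro g t
    rw [List.foldl_cons, List.foldl_cons]
    have hstep : ((((pvMapG g).setdefault (((PySem.Dict.mk s).get? "node_id").getD "") (PySem.Dict.mk [("word_count", (0 : Int)), ("segment_count", (0 : Int))])).modify
        (((PySem.Dict.mk s).get? "node_id").getD "") (PySem.Dict.mk []) (fun inner => inner.modify "segment_count" 0 (· + 1))).modify
        (((PySem.Dict.mk s).get? "node_id").getD "") (PySem.Dict.mk []) (fun inner => inner.modify "word_count" 0 (· + ((PySem.Str.split₀ (((PySem.Dict.mk s).get? "content_preview").getD "")).length : Int))),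
        t + ((PySem.Str.split₀ (((PySem.Dict.mk s).get? "content_preview").getD "")).length : Int))
        = (pvMapG (g.modify (((PySem.Dict.mk s).get? "node_id").getD "") [] (fun counts => counts ++ [((PySem.Str.split₀ (((PySem.Dict.mk s).get? "content_preview").getD "")).length : Int)])),
           t + ((PySem.Str.split₀ (((PySem.Dict.mk s).get? "content_preview").getD "")).length : Int)) :=
      Prod.ext (pv_dict_step g _ _) rfl
    refine Eq.trans (congrArg (fun z => List.foldl _ z rest) hstep) ?_
    beta_reduce
    rw [ih]
    simp [pvWC]
    ring

-- ===== VERDICT (by name: the statement is the Claim_ definition above) =====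
theorem calculate_direct_stats_py_spec : Claim_equal_calculate_direct_stats_py := by
  intro segments _ _
  unfold Spec_calculate_direct_stats_py calculate_direct_stats_py calculate_direct_stats_py_alt
  have h := pv_main segments PySem.Dict.empty 0
  have he : pvMapG PySem.Dict.empty = PySem.Dict.empty := rfl
  rw [he] at h
  rw [h]
  simp [pvMapG, List.map_map, Function.comp]
  rfl
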